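-- pv_equiv track=rewrite | github.com/lgd-matlab/guodong.github.io | complete_image_insertion.py | safe_insert
-- ===== SOURCE A (Python) =====
-- def safe_insert(lines, search, image_md, occurrence=1):
--     """Safely insert image after nth occurrence of search text"""
--     count = 0
--     for i, line in enumerate(lines):
--         if search in line:
--             count += 1
--             if count == occurrence:
--                 lines.insert(i+1, f'\n{image_md}\n\n')
--                 return True
--     return False
-- ===== SOURCE B (Python) =====
-- def safe_insert(lines, search, image_md, occurrence=1):
--     """Safely insert image after nth occurrence of search text"""
--     positions = [i for i, line in enumerate(lines) if search in line]
--     if occurrence < 1 or occurrence > len(positions):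
--         return False
--     lines.insert(positions[occurrence - 1] + 1, f'\n{image_md}\n\n')
--     return True
-- ===== Notes on version B (the rewrite author's own statement) =====
-- stated objective: simpler
-- what changed: B first builds the index table of all matching lines in one comprehension, then selects the nth position and inserts, instead of A's fused early-returning scan with a running counter.
import Mathlib
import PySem

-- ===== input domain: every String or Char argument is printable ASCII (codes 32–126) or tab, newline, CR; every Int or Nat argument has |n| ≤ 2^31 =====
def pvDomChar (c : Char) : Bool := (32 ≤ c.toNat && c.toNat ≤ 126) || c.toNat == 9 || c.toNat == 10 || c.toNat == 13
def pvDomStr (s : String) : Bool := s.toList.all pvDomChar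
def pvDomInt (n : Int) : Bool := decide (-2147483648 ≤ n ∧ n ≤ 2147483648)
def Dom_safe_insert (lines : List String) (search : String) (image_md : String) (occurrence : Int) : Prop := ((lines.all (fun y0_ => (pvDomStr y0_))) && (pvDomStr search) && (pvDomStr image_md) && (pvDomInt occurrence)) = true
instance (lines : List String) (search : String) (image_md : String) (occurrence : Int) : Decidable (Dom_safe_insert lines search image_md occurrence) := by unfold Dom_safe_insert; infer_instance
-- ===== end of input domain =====

-- B separates 'find all matches' from 'select the nth and insert' (simpler decomposition); same return value and same in-place mutation as A.


-- ===== PORT A =====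
-- Both Pythons also mutate `lines` in place (identically); the equivalence here is about the RETURN value.
-- scan with a running counter; returns true the moment the counter reaches `occurrence`
def safeInsertGo (rest : List String) (search : String) (count : Int) (occurrence : Int) : Bool :=
  match rest with
  | [] => false
  | l :: rest' =>
      if PySem.Str.isIn search l then
        if count + 1 = occurrence then true
        else safeInsertGo rest' search (count + 1) occurrence
      else safeInsertGo rest' search count occurrence

def safe_insert (lines : List String) (search : String) (image_md : String) (occurrence : Int) : Bool :=
  safeInsertGo lines search 0 occurrence

-- ===== PORT B =====
-- B: build the index table of all matching lines, then select the nth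
def safe_insert_alt (lines : List String) (search : String) (image_md : String) (occurrence : Int) : Bool :=
  let positions : List Int :=
    ((PySem.List.enumerate lines).filter (fun p => PySem.Str.isIn search p.2)).map (·.1)
  if occurrence < 1 ∨ occurrence > (positions.length : Int) then false else true

-- ===== PRECONDITION & SPEC =====
def Spec_safe_insert (lines : List String) (search : String) (image_md : String) (occurrence : Int) (out : Bool) : Prop := out = safe_insert_alt lines search image_md occurrence
instance (lines : List String) (search : String) (image_md : String) (occurrence : Int) (out : Bool) : Decidable (Spec_safe_insert lines search image_md occurrence out) := by unfold Spec_safe_insert; infer_instance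

-- ===== CLAIM (what is proved, stated in full; the proofs are below) =====
def Claim_equal_safe_insert : Prop := ∀ (lines : List String) (search : String) (image_md : String) (occurrence : Int), Dom_safe_insert lines search image_md occurrence → Spec_safe_insert lines search image_md occurrence (safe_insert lines search image_md occurrence)

-- ===== LEMMAS AND PROOFS =====

-- ===== VERDICT (by name: the statement is the Claim_ definition above) =====
-- A's scan returns true iff the counter (starting at c) reaches `occurrence` within the matches
theorem safeInsertGo_eq (rest : List String) (search : String) (occurrence : Int) :
    ∀ c : Int, safeInsertGo rest search c occurrence =
      decide (c < occurrence ∧ occurrence ≤ c + (rest.countP (fun l => PySem.Str.isIn search l))) := by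
  induction rest with
  | nil =>
      intro c
      simp only [safeInsertGo, List.countP_nil]
      symm; rw [decide_eq_false_iff_not]; omega
  | cons l rest' ih =>
      intro c
      simp only [safeInsertGo, List.countP_cons]
      by_cases h : PySem.Str.isIn search l = true
      · rw [if_pos h]
        by_cases hc : c + 1 = occurrence
        · rw [if_pos hc]
          symm; rw [decide_eq_true_iff]
          simp only [h, if_true]
          omega
        · rw [if_neg hc, ih]
          simp only [h, if_true, decide_eq_decide]
          omega
      · rw [if_neg h, ih]
        have h' : PySem.Chars.isIn search.toList l.toList = false := by simpa using h
        simp [h']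

theorem positions_length (lines : List String) (search : String) :
    ∀ s : Int, (((PySem.List.enumerate lines s).filter (fun p => PySem.Str.isIn search p.2)).map (·.1)).length
      = lines.countP (fun l => PySem.Str.isIn search l) := by
  induction lines with
  | nil => intro s; simp [PySem.List.enumerate_nil]
  | cons l rest ih =>
      intro s
      rw [PySem.List.enumerate_cons, List.countP_cons, List.filter_cons]
      by_cases h : PySem.Str.isIn search l = true
      · simp only [h, if_true, List.map_cons, List.length_cons, ih]
      · have h' : PySem.Chars.isIn search.toList l.toList = false := by simpa using h
        simpa [h'] using ih (s + 1)

theorem safe_insert_spec : Claim_equal_safe_insert := by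
  intro lines search image_md occurrence _
  unfold Spec_safe_insert safe_insert safe_insert_alt
  rw [safeInsertGo_eq]
  simp only [positions_length, zero_add]
  split_ifs with h
  · rw [decide_eq_false_iff_not]; omega
  · rw [decide_eq_true_iff]; omega
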